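-- pv_equiv track=rewrite | github.com/rhythm2019/PAT-Advanced-Level-Practice | 1081.py | getSimple
-- ===== SOURCE A (Python) =====
-- def getSimple(a: int, b: int) -> str:
--     if b == 0:
--         return 'Inf'
--     elif a == 0:
--         return ('0')
--     elif a % b == 0:
--         return str(a // b) if a > 0 else '(' + str(a // b) + ')'
--     else:
--         sign = 1 if a > 0 else -1
--         a = abs(a)
--         k = a // b
--         a = a % b
--
--         x = a
--         y = b
--         r = x % y
--         while r:
--             x = y
--             y = r
--             r = x % y
--         a = a // y
--         b = b // y
--
--         if k:
--             if sign == 1: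
--                 return '{} {}/{}'.format(k, a, b)
--             elif sign == -1:
--                 return '(-{} {}/{})'.format(k, a, b)
--         else:
--             if sign == 1:
--                 return '{}/{}'.format(a, b)
--             elif sign == -1:
--                 return '(-{}/{})'.format(a, b)
-- ===== SOURCE B (Python) =====
-- def _gcd(x, y):
--     return x if y == 0 else _gcd(y, x % y)
--
-- def getSimple(a: int, b: int) -> str:
--     if b == 0:
--         return 'Inf'
--     if a == 0:
--         return '0'
--     if a % b == 0:
--         s = str(a // b)
--         return s if a > 0 else '(' + s + ')'
--     m = abs(a)
--     k, r = divmod(m, b)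
--     g = _gcd(r, b)
--     frac = '{}/{}'.format(r // g, b // g)
--     body = '{} {}'.format(k, frac) if k else frac
--     return body if a > 0 else '(-' + body + ')'
-- ===== Notes on version B (the rewrite author's own statement) =====
-- stated objective: simpler
-- what changed: Replaced A's inline while-loop Euclidean GCD with a recursive gcd helper and collapsed A's four format branches into one shared body string built via divmod, with sign/parenthesization applied once at the end.
import Mathlib
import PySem

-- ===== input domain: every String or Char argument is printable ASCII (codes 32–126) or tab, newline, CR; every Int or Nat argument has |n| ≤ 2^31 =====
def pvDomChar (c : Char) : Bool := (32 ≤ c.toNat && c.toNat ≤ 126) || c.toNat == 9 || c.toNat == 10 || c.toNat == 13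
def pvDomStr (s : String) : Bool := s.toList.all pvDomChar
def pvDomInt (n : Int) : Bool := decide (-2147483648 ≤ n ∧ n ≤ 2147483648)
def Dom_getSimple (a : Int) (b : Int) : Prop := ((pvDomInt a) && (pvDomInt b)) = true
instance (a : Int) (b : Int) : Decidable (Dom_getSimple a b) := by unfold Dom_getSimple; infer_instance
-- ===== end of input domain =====

-- B changes the decomposition (recursive gcd, divmod, one shared body string instead of four format branches); objective: simpler.

-- termination lemma used by both gcd recursions (Python mod: |a % b| < |b| for b ≠ 0)
theorem pvModNatAbsLt (a b : Int) (h : b ≠ 0) : (PySem.Int.mod a b).natAbs < b.natAbs := by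
  rcases lt_trichotomy b 0 with hb | hb | hb
  · have := PySem.Int.mod_neg_bounds (a := a) hb
    omega
  · exact absurd hb h
  · have h1 := PySem.Int.mod_nonneg (a := a) hb
    have h2 := PySem.Int.mod_lt (a := a) hb
    omega

-- ===== PORT A =====
-- the 'while r' Euclidean loop of A, state (x, y, r); returns the final y
def pvGcdLoop (x y r : Int) : Int :=
  if hr : r = 0 then y
  else pvGcdLoop y r (PySem.Int.mod y r)
termination_by r.natAbs
decreasing_by exact pvModNatAbsLt y r hr

def getSimple (a : Int) (b : Int) : String :=
  if b = 0 then "Inf"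
  else if a = 0 then "0"
  else if PySem.Int.mod a b = 0 then
    if a > 0 then PySem.Int.toStr (PySem.Int.floordiv a b)
    else "(" ++ PySem.Int.toStr (PySem.Int.floordiv a b) ++ ")"
  else
    let sign : Int := if a > 0 then 1 else -1
    let a1 := |a|
    let k := PySem.Int.floordiv a1 b
    let a2 := PySem.Int.mod a1 b
    let y := pvGcdLoop a2 b (PySem.Int.mod a2 b)
    let a3 := PySem.Int.floordiv a2 y
    let b3 := PySem.Int.floordiv b y
    if k ≠ 0 then
      if sign = 1 then
        PySem.Int.toStr k ++ " " ++ PySem.Int.toStr a3 ++ "/" ++ PySem.Int.toStr b3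
      else
        "(-" ++ PySem.Int.toStr k ++ " " ++ PySem.Int.toStr a3 ++ "/" ++ PySem.Int.toStr b3 ++ ")"
    else
      if sign = 1 then PySem.Int.toStr a3 ++ "/" ++ PySem.Int.toStr b3
      else "(-" ++ PySem.Int.toStr a3 ++ "/" ++ PySem.Int.toStr b3 ++ ")"

-- ===== PORT B =====
def pvGcdRec (x y : Int) : Int :=
  if hy : y = 0 then x
  else pvGcdRec y (PySem.Int.mod x y)
termination_by y.natAbs
decreasing_by exact pvModNatAbsLt x y hy

def getSimple_alt (a : Int) (b : Int) : String :=
  if b = 0 then "Inf"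
  else if a = 0 then "0"
  else if PySem.Int.mod a b = 0 then
    let s := PySem.Int.toStr (PySem.Int.floordiv a b)
    if a > 0 then s else "(" ++ s ++ ")"
  else
    let m := |a|
    let k := PySem.Int.floordiv m b
    let r := PySem.Int.mod m b
    let g := pvGcdRec r b
    let frac := PySem.Int.toStr (PySem.Int.floordiv r g) ++ "/" ++ PySem.Int.toStr (PySem.Int.floordiv b g)
    let body := if k ≠ 0 then PySem.Int.toStr k ++ " " ++ frac else frac
    if a > 0 then body else "(-" ++ body ++ ")"

-- ===== PRECONDITION & SPEC =====
def Spec_getSimple (a : Int) (b : Int) (out : String) : Prop := out = getSimple_alt a b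
instance (a : Int) (b : Int) (out : String) : Decidable (Spec_getSimple a b out) := by unfold Spec_getSimple; infer_instance

-- ===== CLAIM (what is proved, stated in full; the proofs are below) =====
def Claim_equal_getSimple : Prop := ∀ (a : Int) (b : Int), Dom_getSimple a b → Spec_getSimple a b (getSimple a b)

-- ===== LEMMAS AND PROOFS =====

-- A's while-loop equals B's recursive gcd: the loop is called with r = x % y
theorem pvGcdLoop_eq_rec (x y r : Int) : pvGcdLoop x y r = pvGcdRec y r := by
  by_cases hr : r = 0
  · rw [pvGcdLoop, pvGcdRec]; simp [hr]
  · rw [pvGcdLoop, pvGcdRec]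
    simp only [hr, dite_false]
    exact pvGcdLoop_eq_rec y r (PySem.Int.mod y r)
termination_by r.natAbs
decreasing_by exact pvModNatAbsLt y r hr

theorem pvGcdRec_unfold (x y : Int) (hy : y ≠ 0) :
    pvGcdRec x y = pvGcdRec y (PySem.Int.mod x y) := by
  rw [pvGcdRec]; simp [hy]

-- ===== VERDICT (by name: the statement is the Claim_ definition above) =====
theorem getSimple_spec : Claim_equal_getSimple := by
  unfold Claim_equal_getSimple
  intro a b _
  unfold Spec_getSimple getSimple getSimple_alt
  by_cases hb : b = 0
  · simp [hb]
  · simp only [hb, if_false]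
    by_cases ha : a = 0
    · simp [ha]
    · simp only [ha, if_false]
      by_cases hm : PySem.Int.mod a b = 0
      · by_cases hpos : a > 0 <;> simp [hm, hpos]
      · simp only [hm, if_false]
        have hg : pvGcdLoop (PySem.Int.mod |a| b) b (PySem.Int.mod (PySem.Int.mod |a| b) b)
            = pvGcdRec (PySem.Int.mod |a| b) b := by
          rw [pvGcdLoop_eq_rec, pvGcdRec_unfold _ _ hb]
        simp only [hg]
        by_cases hk : PySem.Int.floordiv |a| b = 0 <;>
          by_cases hpos : a > 0 <;>
            simp [hk, hpos, String.append_assoc]
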